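-- pv_equiv track=rewrite | github.com/codelion/openevolve | examples/huawei_2017/initial_program.py | solve_cdn_deployment
-- ===== SOURCE A (Python) =====
-- from typing import List, Tuple, Dict, Set
--
-- def solve_cdn_deployment(
--     num_nodes: int,
--     edges: List[Tuple[int, int, int, int]],  # (u, v, bandwidth, cost_per_unit)
--     consumers: List[Tuple[int, int, int]],  # (consumer_id, connected_node, demand)
--     server_types: List[Tuple[int, int, int]],  # (type_id, capacity, hardware_cost)
--     node_deploy_costs: List[Tuple[int, int]]  # (node_id, deploy_cost)
-- ) -> Tuple[int, List[Tuple[List[int], int, int, int]]]: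
--     """
--     Solve CDN server deployment problem using simple greedy strategy
--
--     Strategy: Deploy one server per consumer at their connected node
--     This avoids bandwidth constraint issues by minimizing path lengths
--
--     Returns:
--         total_cost: Total deployment and bandwidth cost
--         paths: List of (path, consumer_id, bandwidth, server_type)
--     """
--     # Create deploy cost map
--     deploy_cost_map = {node_id: cost for node_id, cost in node_deploy_costs}
--
--     # Create server type map
--     server_map = {type_id: (capacity, hw_cost) for type_id, capacity, hw_cost in server_types}
--
--     total_cost = 0
--     paths = []
--     deployed_servers: Dict[int, Tuple[int, int, int]] = {}  # node -> (server_type, capacity, used)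
--
--     # Sort consumers by demand (highest first) for better server type selection
--     sorted_consumers = sorted(consumers, key=lambda x: x[2], reverse=True)
--
--     for consumer_id, connected_node, demand in sorted_consumers:
--         server_node = connected_node
--
--         # Check if we already have a server at this node
--         if server_node not in deployed_servers:
--             # Choose appropriate server type
--             # Pick the smallest server type that can handle this consumer
--             chosen_type = None
--             for type_id, (capacity, hw_cost) in sorted(server_map.items(), key=lambda x: x[1][0]):
--                 if capacity >= demand:
--                     chosen_type = type_id
--                     break
--
--             if chosen_type is None:
--                 # Use largest server if none fit
--                 chosen_type = max(server_map.keys(), key=lambda t: server_map[t][0])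
--
--             capacity, hw_cost = server_map[chosen_type]
--             deploy_cost = deploy_cost_map.get(server_node, 0)
--
--             # Add deployment cost
--             total_cost += hw_cost + deploy_cost
--
--             # Record deployed server
--             deployed_servers[server_node] = (chosen_type, capacity, 0)
--
--         # Get server info
--         server_type, capacity, used = deployed_servers[server_node]
--
--         # Check if server can handle this consumer
--         if used + demand > capacity:
--             # Need to upgrade or add another server
--             # For simplicity, deploy a new larger server
--             # Find a server type that can handle total demand
--             total_demand = used + demand
--
--             for type_id, (cap, hw_cost) in sorted(server_map.items(), key=lambda x: x[1][0]):
--                 if cap >= total_demand: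
--                     # Only pay additional cost if upgrading
--                     old_hw_cost = server_map[server_type][1]
--                     if hw_cost > old_hw_cost:
--                         total_cost += (hw_cost - old_hw_cost)
--
--                     server_type = type_id
--                     capacity = cap
--                     break
--
--             deployed_servers[server_node] = (server_type, capacity, total_demand)
--         else:
--             # Server can handle it
--             deployed_servers[server_node] = (server_type, capacity, used + demand)
--
--         # Path is just the server node itself (server and consumer at same node)
--         path = [server_node]
--
--         # No bandwidth cost since server is co-located with consumer
--         # Record path
--         paths.append((path, consumer_id, demand, server_type))
--
--     return total_cost, paths
-- ===== SOURCE B (Python) =====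
-- from typing import List, Tuple
--
--
-- def solve_cdn_deployment(
--     num_nodes: int,
--     edges: List[Tuple[int, int, int, int]],
--     consumers: List[Tuple[int, int, int]],
--     server_types: List[Tuple[int, int, int]],
--     node_deploy_costs: List[Tuple[int, int]],
-- ) -> Tuple[int, List[Tuple[List[int], int, int, int]]]:
--     # Staged pipeline: precompute the capacity-sorted type table once, pick the
--     # smallest fitting type by binary search, run one cost/state pass that only
--     # records the chosen type per consumer, and assemble the paths afterwards.
--     deploy_cost = {n: c for n, c in node_deploy_costs}
--     tmap = {t: (cap, hw) for t, cap, hw in server_types}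
--     by_cap = sorted(tmap.items(), key=lambda kv: kv[1][0])
--     caps = [kv[1][0] for kv in by_cap]
--
--     def fit(need):
--         # hand-written bisect_left over the sorted capacity column
--         lo, hi = 0, len(caps)
--         while lo < hi:
--             mid = (lo + hi) // 2
--             if caps[mid] < need:
--                 lo = mid + 1
--             else:
--                 hi = mid
--         return by_cap[lo] if lo < len(by_cap) else None
--
--     def assign(state, node, dem):
--         """One consumer at node: (added cost, chosen type, new per-node record)."""
--         prev = state.get(node)
--         if prev is None:
--             hit = fit(dem)
--             if hit is None:  # no type fits: take the largest-capacity type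
--                 hit = max(tmap.items(), key=lambda kv: kv[1][0])
--             t, (cap, hw) = hit
--             return hw + deploy_cost.get(node, 0), t, (t, cap, dem)
--         t, cap, used = prev
--         need = used + dem
--         if need <= cap:
--             return 0, t, (t, cap, need)
--         hit = fit(need)
--         if hit is None:
--             return 0, t, (t, cap, need)
--         nt, (ncap, nhw) = hit
--         ohw = tmap[t][1]
--         return (nhw - ohw if nhw > ohw else 0), nt, (nt, ncap, need)
--
--     order = sorted(consumers, key=lambda x: x[2], reverse=True)
--     total, types, state = 0, [], {}
--     for _cid, node, dem in order:
--         dc, t, rec = assign(state, node, dem)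
--         total += dc
--         state[node] = rec
--         types.append(t)
--     return total, [([node], cid, dem, t) for (cid, node, dem), t in zip(order, types)]
-- ===== Notes on version B (the rewrite author's own statement) =====
-- stated objective: faster
-- what changed: B precomputes one capacity-sorted type table and picks the smallest fitting type by a hand-written binary search (A re-sorts the type map and linearly scans it inside every consumer iteration), merges A's separate deploy-then-upgrade phases into a single per-consumer assign step that returns (cost delta, type, record), and assembles the paths afterwards by zipping the sorted consumers with the recorded types.
import Mathlib
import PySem

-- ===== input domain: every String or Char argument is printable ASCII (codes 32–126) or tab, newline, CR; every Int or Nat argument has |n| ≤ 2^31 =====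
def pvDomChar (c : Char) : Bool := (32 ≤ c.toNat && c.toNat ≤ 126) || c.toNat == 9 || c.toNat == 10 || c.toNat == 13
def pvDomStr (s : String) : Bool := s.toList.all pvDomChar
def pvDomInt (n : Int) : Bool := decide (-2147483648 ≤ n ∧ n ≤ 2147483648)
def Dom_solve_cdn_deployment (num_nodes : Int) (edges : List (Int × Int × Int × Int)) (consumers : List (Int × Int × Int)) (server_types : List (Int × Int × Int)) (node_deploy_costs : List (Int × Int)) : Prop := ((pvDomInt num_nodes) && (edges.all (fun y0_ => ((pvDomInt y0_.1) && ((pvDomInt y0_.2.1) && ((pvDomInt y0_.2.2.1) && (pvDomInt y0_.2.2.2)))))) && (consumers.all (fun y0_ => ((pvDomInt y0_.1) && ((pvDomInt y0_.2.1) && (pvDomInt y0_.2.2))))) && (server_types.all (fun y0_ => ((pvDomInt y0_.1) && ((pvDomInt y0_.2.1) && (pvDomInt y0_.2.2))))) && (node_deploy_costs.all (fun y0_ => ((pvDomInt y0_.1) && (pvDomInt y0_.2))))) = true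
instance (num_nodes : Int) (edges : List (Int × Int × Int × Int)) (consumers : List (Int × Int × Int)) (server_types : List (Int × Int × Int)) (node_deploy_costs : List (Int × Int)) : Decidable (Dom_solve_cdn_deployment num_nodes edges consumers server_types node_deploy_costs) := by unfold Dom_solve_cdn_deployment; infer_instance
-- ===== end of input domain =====

-- ===== PORT A =====
-- B replaces A's per-consumer re-sort + linear scan by one capacity-sorted table with
-- binary search, merges A's deploy/upgrade phases into one case analysis, and assembles
-- the paths in a separate zip pass; return values proved equal on Pre_.

-- one iteration of A's 'for consumer_id, connected_node, demand in sorted_consumers' loop;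
-- state = (total_cost, paths, deployed_servers)
def cdnStepA (server_map : PySem.Dict Int (Int × Int)) (deploy_cost_map : PySem.Dict Int Int)
    (st : Int × List (List Int × Int × Int × Int) × PySem.Dict Int (Int × Int × Int))
    (c : Int × Int × Int) :
    Int × List (List Int × Int × Int × Int) × PySem.Dict Int (Int × Int × Int) :=
  let consumer_id := c.1
  let server_node := c.2.1
  let demand := c.2.2
  let st1 :=
    if st.2.2.contains server_node then st
    else
      let chosen_type :=
        match (PySem.List.sorted server_map.items (fun x => x.2.1) false).find?
            (fun it => decide (demand ≤ it.2.1)) with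
        | some it => it.1
        | none =>
          -- max(server_map.keys(), key=…): ValueError on an empty dict is excluded by
          -- Pre_; the .getD 0 default is unreachable there
          (PySem.List.max? server_map.keys (fun t => (server_map.getD t (0, 0)).1)).getD 0
      let cw := server_map.getD chosen_type (0, 0)     -- key always present (no KeyError)
      let deploy_cost := deploy_cost_map.getD server_node 0
      (st.1 + cw.2 + deploy_cost, st.2.1,
        st.2.2.insert server_node (chosen_type, cw.1, 0))
  let info := st1.2.2.getD server_node (0, 0, 0)       -- key always present (no KeyError)
  let server_type := info.1
  let capacity := info.2.1
  let used := info.2.2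
  if capacity < used + demand then
    let total_demand := used + demand
    let upd :=      -- (added cost, new server_type, new capacity)
      match (PySem.List.sorted server_map.items (fun x => x.2.1) false).find?
          (fun it => decide (total_demand ≤ it.2.1)) with
      | some it =>
        let old_hw := (server_map.getD server_type (0, 0)).2
        ((if old_hw < it.2.2 then it.2.2 - old_hw else 0), it.1, it.2.1)
      | none => (0, server_type, capacity)
    (st1.1 + upd.1,
      st1.2.1 ++ [([server_node], consumer_id, demand, upd.2.1)],
      st1.2.2.insert server_node (upd.2.1, upd.2.2, total_demand))
  else
    (st1.1,
      st1.2.1 ++ [([server_node], consumer_id, demand, server_type)],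
      st1.2.2.insert server_node (server_type, capacity, used + demand))

def solve_cdn_deployment (num_nodes : Int) (edges : List (Int × Int × Int × Int)) (consumers : List (Int × Int × Int)) (server_types : List (Int × Int × Int)) (node_deploy_costs : List (Int × Int)) : Int × (List (List Int × Int × Int × Int)) :=
  let deploy_cost_map := PySem.Dict.ofList node_deploy_costs
  let server_map : PySem.Dict Int (Int × Int) :=
    PySem.Dict.ofList (server_types.map (fun t => (t.1, (t.2.1, t.2.2))))
  let sorted_consumers := PySem.List.sorted consumers (fun x => x.2.2) true
  let fin := sorted_consumers.foldl (cdnStepA server_map deploy_cost_map)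
      (0, [], PySem.Dict.empty)
  (fin.1, fin.2.1)

-- ===== PORT B =====
-- fit(need): the hand-written lo/hi loop is PySem.List.bisectLeft (the same loop);
-- 'by_cap[lo] if lo < len(by_cap) else None' is the checked get [·]?
def cdnFit (by_cap : List (Int × Int × Int)) (caps : List Int) (need : Int) :
    Option (Int × Int × Int) :=
  by_cap[PySem.List.bisectLeft caps need]?

-- assign(state, node, dem): (added cost, chosen type, new per-node record); one merged
-- case analysis.  In the no-type-fits-and-no-types case Python B raises (outside Pre_);
-- the port returns the 0-record there.
def cdnAssign (tmap : PySem.Dict Int (Int × Int)) (deploy_cost : PySem.Dict Int Int)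
    (by_cap : List (Int × Int × Int)) (caps : List Int)
    (state : PySem.Dict Int (Int × Int × Int)) (node dem : Int) :
    Int × Int × (Int × Int × Int) :=
  match state.get? node with
  | none =>
    (match cdnFit by_cap caps dem with
     | some (t, cap, hw) => (hw + deploy_cost.getD node 0, t, (t, cap, dem))
     | none =>
       match PySem.List.max? tmap.items (fun kv => kv.2.1) with
       | some (t, cap, hw) => (hw + deploy_cost.getD node 0, t, (t, cap, dem))
       | none => (deploy_cost.getD node 0, 0, (0, 0, dem)))
  | some (t, cap, used) =>
    let need := used + dem
    if need ≤ cap then (0, t, (t, cap, need))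
    else
      match cdnFit by_cap caps need with
      | some (nt, ncap, nhw) =>
        let ohw := (tmap.getD t (0, 0)).2
        ((if nhw > ohw then nhw - ohw else 0), nt, (nt, ncap, need))
      | none => (0, t, (t, cap, need))

-- the main pass: total cost and the per-consumer chosen types, state threaded through
def cdnRun (tmap : PySem.Dict Int (Int × Int)) (deploy_cost : PySem.Dict Int Int)
    (by_cap : List (Int × Int × Int)) (caps : List Int) :
    List (Int × Int × Int) → PySem.Dict Int (Int × Int × Int) → Int × List Int
  | [], _ => (0, [])
  | c :: rest, state =>
    let r := cdnAssign tmap deploy_cost by_cap caps state c.2.1 c.2.2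
    let tail := cdnRun tmap deploy_cost by_cap caps rest (state.insert c.2.1 r.2.2)
    (r.1 + tail.1, r.2.1 :: tail.2)

def solve_cdn_deployment_alt (num_nodes : Int) (edges : List (Int × Int × Int × Int)) (consumers : List (Int × Int × Int)) (server_types : List (Int × Int × Int)) (node_deploy_costs : List (Int × Int)) : Int × (List (List Int × Int × Int × Int)) :=
  let deploy_cost := PySem.Dict.ofList node_deploy_costs
  let tmap : PySem.Dict Int (Int × Int) :=
    PySem.Dict.ofList (server_types.map (fun t => (t.1, (t.2.1, t.2.2))))
  let by_cap := PySem.List.sorted tmap.items (fun kv => kv.2.1) false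
  let caps := by_cap.map (fun kv => kv.2.1)
  let order := PySem.List.sorted consumers (fun x => x.2.2) true
  let run := cdnRun tmap deploy_cost by_cap caps order PySem.Dict.empty
  (run.1, List.zipWith (fun c t => ([c.2.1], c.1, c.2.2, t)) order run.2)

-- ===== PRECONDITION & SPEC =====
-- Pre_ excludes only the inputs where Python A raises: with at least one consumer and an
-- empty server-type list, A's max() over the empty key set raises ValueError (B raises too).
def Pre_solve_cdn_deployment (num_nodes : Int) (edges : List (Int × Int × Int × Int)) (consumers : List (Int × Int × Int)) (server_types : List (Int × Int × Int)) (node_deploy_costs : List (Int × Int)) : Prop :=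
  consumers = [] ∨ server_types ≠ []
instance (num_nodes : Int) (edges : List (Int × Int × Int × Int)) (consumers : List (Int × Int × Int)) (server_types : List (Int × Int × Int)) (node_deploy_costs : List (Int × Int)) : Decidable (Pre_solve_cdn_deployment num_nodes edges consumers server_types node_deploy_costs) := by unfold Pre_solve_cdn_deployment; infer_instance

def pvWitness_solve_cdn_deployment : Int × (List (Int × Int × Int × Int)) × (List (Int × Int × Int)) × (List (Int × Int × Int)) × (List (Int × Int)) :=
  (2, [(0, 1, 5, 1)], [(0, 1, 3)], [(0, 5, 4)], [(1, 2)])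

def Spec_solve_cdn_deployment (num_nodes : Int) (edges : List (Int × Int × Int × Int)) (consumers : List (Int × Int × Int)) (server_types : List (Int × Int × Int)) (node_deploy_costs : List (Int × Int)) (out : Int × (List (List Int × Int × Int × Int))) : Prop := out = solve_cdn_deployment_alt num_nodes edges consumers server_types node_deploy_costs
instance (num_nodes : Int) (edges : List (Int × Int × Int × Int)) (consumers : List (Int × Int × Int)) (server_types : List (Int × Int × Int)) (node_deploy_costs : List (Int × Int)) (out : Int × (List (List Int × Int × Int × Int))) : Decidable (Spec_solve_cdn_deployment num_nodes edges consumers server_types node_deploy_costs out) := by unfold Spec_solve_cdn_deployment; infer_instance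

-- ===== CLAIM (what is proved, stated in full; the proofs are below) =====
def Claim_equal_solve_cdn_deployment : Prop := ∀ (num_nodes : Int) (edges : List (Int × Int × Int × Int)) (consumers : List (Int × Int × Int)) (server_types : List (Int × Int × Int)) (node_deploy_costs : List (Int × Int)), Dom_solve_cdn_deployment num_nodes edges consumers server_types node_deploy_costs → Pre_solve_cdn_deployment num_nodes edges consumers server_types node_deploy_costs → Spec_solve_cdn_deployment num_nodes edges consumers server_types node_deploy_costs (solve_cdn_deployment num_nodes edges consumers server_types node_deploy_costs)

-- ===== LEMMAS AND PROOFS =====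

-- overwriting the same key twice keeps only the second value
theorem cdn_insert_insert {κ ν : Type} [BEq κ] [LawfulBEq κ]
    (d : PySem.Dict κ ν) (k : κ) (a b : ν) :
    (d.insert k a).insert k b = d.insert k b := by
  apply PySem.Dict.ext
  by_cases h : d.contains k = true
  · rw [PySem.Dict.items_insert_of_contains _ _ h,
      PySem.Dict.items_insert_of_contains _ _ (PySem.Dict.contains_insert_self _ _ _),
      PySem.Dict.items_insert_of_contains _ _ h, List.map_map]
    apply List.map_congr_left
    intro p _
    by_cases hp : p.1 = k <;> simp [Function.comp, hp]
  · rw [PySem.Dict.items_insert_of_contains _ _ (PySem.Dict.contains_insert_self _ _ _),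
      PySem.Dict.items_insert_of_not_contains _ _ (by simpa using h),
      PySem.Dict.items_insert_of_not_contains _ _ (by simpa using h), List.map_append]
    have hmem : ∀ p ∈ d.items, (p.1 == k) = false := by
      intro p hp
      have : k ∈ d.keys → d.contains k = true := by
        intro hk; exact (PySem.Dict.contains_iff_mem_keys _ _).2 hk
      refine beq_eq_false_iff_ne.2 ?_
      intro hpk
      exact h (this (hpk ▸ PySem.Dict.mem_keys_of_mem_items d hp))
    refine congrArg₂ (· ++ ·) ?_ (by simp)
    conv_rhs => rw [← List.map_id d.items]
    exact List.map_congr_left (fun p hp => by simp [hmem p hp])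

-- find? of the first predicate-satisfying element, given a split index i:
-- everything before i fails, everything from i on succeeds
theorem cdn_find?_eq_getElem? {a : Type} (p : a → Bool) (xs : List a) (i : Nat)
    (h1 : ∀ j (hj : j < xs.length), j < i → p xs[j] = false)
    (h2 : ∀ j (hj : j < xs.length), i ≤ j → p xs[j] = true) :
    xs.find? p = xs[i]? := by
  induction xs generalizing i with
  | nil => simp
  | cons x t ih =>
    cases i with
    | zero =>
      have hx : p x = true := h2 0 (by simp) (Nat.le_refl 0)
      simp [List.find?, hx]
    | succ i' =>
      have hx : p x = false := h1 0 (by simp) (Nat.succ_pos i')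
      have := ih i'
        (fun j hj hlt => h1 (j + 1) (by simpa using Nat.succ_lt_succ hj) (Nat.succ_lt_succ hlt))
        (fun j hj hle => h2 (j + 1) (by simpa using Nat.succ_lt_succ hj) (Nat.succ_le_succ hle))
      simpa [List.find?, hx] using this

-- binary search over the capacity column = A's linear first-fit scan
theorem cdn_bisect_eq_find (server_map : PySem.Dict Int (Int × Int)) (d : Int) :
    cdnFit (PySem.List.sorted server_map.items (fun x => x.2.1) false)
        ((PySem.List.sorted server_map.items (fun x => x.2.1) false).map (fun kv => kv.2.1)) d
      = (PySem.List.sorted server_map.items (fun x => x.2.1) false).find?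
          (fun it => decide (d ≤ it.2.1)) := by
  classical
  set tbc := PySem.List.sorted server_map.items (fun x => x.2.1) false with htbc
  have hsorted : ((tbc).map (fun kv => kv.2.1)).Pairwise (· ≤ ·) := by
    rw [htbc]
    exact PySem.List.sorted_map_key_pairwise _ _
  obtain ⟨hle, hlo, hhi⟩ := PySem.List.bisectLeft_spec (tbc.map (fun kv => kv.2.1)) d hsorted
  set i := PySem.List.bisectLeft (tbc.map (fun kv => kv.2.1)) d with hi
  have hlen : (tbc.map (fun kv => kv.2.1)).length = tbc.length := by simp
  rw [cdnFit, ← hi]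
  refine (cdn_find?_eq_getElem? _ tbc i ?_ ?_).symm
  · intro j hj hlt
    have hj' : j < (tbc.map (fun kv => kv.2.1)).length := by omega
    have := hlo j hj' hlt
    simp only [List.getElem_map] at this
    simp [not_le.2 this]
  · intro j hj hge
    have hj' : j < (tbc.map (fun kv => kv.2.1)).length := by omega
    have := hhi j hj' hge
    simp only [List.getElem_map] at this
    simp [this]

-- max over the keys with a lookup key-function = fst of max over the items
def cdnMaxStep {a : Type} (f : a -> Int) : Option a -> a -> Option a
  | none, x => some x
  | some m, x => if f m < f x then some x else some m

theorem cdn_max?_eq_foldl {a : Type} (xs : List a) (f : a -> Int) :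
    PySem.List.max? xs f = xs.foldl (cdnMaxStep f) none := by
  unfold PySem.List.max?
  congr 1
  funext acc x
  cases acc <;> rfl

theorem cdn_max_map_aux (f : Int → Int) (l : List (Int × Int × Int))
    (acc : Option (Int × Int × Int))
    (h : ∀ kv ∈ l, f kv.1 = kv.2.1)
    (hacc : ∀ m, acc = some m → f m.1 = m.2.1) :
    List.foldl (cdnMaxStep f) (Option.map (fun kv => kv.1) acc) (l.map (fun kv => kv.1))
      = Option.map (fun kv => kv.1)
          (List.foldl (cdnMaxStep (fun kv : Int × Int × Int => kv.2.1)) acc l) := by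
  induction l generalizing acc with
  | nil => simp
  | cons kv t ih =>
    have hkv : f kv.1 = kv.2.1 := h kv (by simp)
    cases acc with
    | none =>
      simp only [List.map_cons, List.foldl_cons, Option.map_none, cdnMaxStep]
      exact ih (some kv) (fun x hx => h x (by simp [hx])) (by intro x hx; cases hx; exact hkv)
    | some m =>
      have hm : f m.1 = m.2.1 := hacc m rfl
      simp only [List.map_cons, List.foldl_cons, Option.map_some, cdnMaxStep, hm, hkv]
      by_cases hc : m.2.1 < kv.2.1
      · rw [if_pos hc, if_pos hc]
        exact ih (some kv) (fun x hx => h x (by simp [hx])) (by intro x hx; cases hx; exact hkv)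
      · rw [if_neg hc, if_neg hc]
        exact ih (some m) (fun x hx => h x (by simp [hx])) (by intro x hx; cases hx; exact hm)

theorem cdn_max_keys_eq (d : PySem.Dict Int (Int × Int)) (hnd : d.keys.Nodup) :
    PySem.List.max? d.keys (fun t => (d.getD t (0, 0)).1)
      = Option.map (fun kv => kv.1)
          (PySem.List.max? d.items (fun kv : Int × Int × Int => kv.2.1)) := by
  have hkeys : d.keys = d.items.map (fun kv => kv.1) := by rfl
  have h : ∀ kv ∈ d.items, (d.getD kv.1 ((0 : Int), (0 : Int))).1 = kv.2.1 := by
    intro kv hkv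
    exact congrArg Prod.fst (PySem.Dict.getD_of_mem_items d (by simpa using hkv) hnd (0, 0))
  rw [hkeys, cdn_max?_eq_foldl, cdn_max?_eq_foldl]
  exact cdn_max_map_aux (fun t => (d.getD t (0, 0)).1) d.items none h (by simp)

-- per-consumer: A's two-phase step = B's merged assign, on cost, appended path and state
theorem cdn_step_eq (tm : PySem.Dict Int (Int × Int)) (dm : PySem.Dict Int Int)
    (hnd : tm.keys.Nodup)
    (cost : Int) (paths : List (List Int × Int × Int × Int))
    (st : PySem.Dict Int (Int × Int × Int)) (c : Int × Int × Int) :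
    cdnStepA tm dm (cost, paths, st) c
      = (cost + (cdnAssign tm dm (PySem.List.sorted tm.items (fun x => x.2.1) false)
            ((PySem.List.sorted tm.items (fun x => x.2.1) false).map (fun kv => kv.2.1))
            st c.2.1 c.2.2).1,
         paths ++ [([c.2.1], c.1, c.2.2,
            (cdnAssign tm dm (PySem.List.sorted tm.items (fun x => x.2.1) false)
              ((PySem.List.sorted tm.items (fun x => x.2.1) false).map (fun kv => kv.2.1))
              st c.2.1 c.2.2).2.1)],
         st.insert c.2.1
            (cdnAssign tm dm (PySem.List.sorted tm.items (fun x => x.2.1) false)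
              ((PySem.List.sorted tm.items (fun x => x.2.1) false).map (fun kv => kv.2.1))
              st c.2.1 c.2.2).2.2) := by
  classical
  obtain ⟨cid, node, dem⟩ := c
  have hbeq := cdn_bisect_eq_find tm
  simp only [cdnStepA, cdnAssign, hbeq]
  cases hg : st.get? node with
  | some info =>
    obtain ⟨t0, cap0, used⟩ := info
    have hc : st.contains node = true := by
      rw [PySem.Dict.contains_eq_isSome_get?, hg]; rfl
    have hgd : st.getD node (0, 0, 0) = (t0, cap0, used) :=
      PySem.Dict.getD_of_get?_eq_some st _ hg
    simp only [hc, if_true, hgd]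
    by_cases hle : used + dem ≤ cap0
    · simp [not_lt.2 hle, hle]
    · have hlt : cap0 < used + dem := not_le.1 hle
      simp only [if_pos hlt, if_neg hle]
      cases hf : (PySem.List.sorted tm.items (fun x => x.2.1) false).find?
          (fun it => decide (used + dem ≤ it.2.1)) with
      | some it =>
        obtain ⟨nt, ncap, nhw⟩ := it
        simp [gt_iff_lt]
      | none => simp
  | none =>
    have hc : st.contains node = false := by
      rw [PySem.Dict.contains_eq_isSome_get?, hg]; rfl
    simp only [hc, Bool.false_eq_true, if_false]
    cases hf : (PySem.List.sorted tm.items (fun x => x.2.1) false).find?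
        (fun it => decide (dem ≤ it.2.1)) with
    | some it =>
      obtain ⟨t1, cap1, hw1⟩ := it
      have hmem : ((t1, cap1, hw1) : Int × Int × Int) ∈ tm.items :=
        (PySem.List.mem_sorted _ _ _ _).1 (List.mem_of_find?_eq_some hf)
      have hgdt : tm.getD t1 (0, 0) = (cap1, hw1) :=
        PySem.Dict.getD_of_mem_items tm hmem hnd (0, 0)
      have hfit : dem ≤ cap1 := by
        have := List.find?_some hf
        exact of_decide_eq_true this
      simp only [hgdt, PySem.Dict.getD_insert_self]
      simp [not_lt.2 hfit, cdn_insert_insert, add_assoc]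
    | none =>
      have hnofit : ∀ it ∈ tm.items, ¬ (dem ≤ it.2.1) := by
        intro it hit
        have := List.find?_eq_none.1 hf it ((PySem.List.mem_sorted _ _ _ _).2 hit)
        simpa using this
      rw [cdn_max_keys_eq tm hnd]
      cases hm : PySem.List.max? tm.items (fun kv : Int × Int × Int => kv.2.1) with
      | some m =>
        obtain ⟨t1, cap1, hw1⟩ := m
        have hmem : ((t1, cap1, hw1) : Int × Int × Int) ∈ tm.items :=
          PySem.List.max?_mem hm
        have hgdt : tm.getD t1 (0, 0) = (cap1, hw1) :=
          PySem.Dict.getD_of_mem_items tm hmem hnd (0, 0)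
        have hsmall : cap1 < dem := not_le.1 (hnofit _ hmem)
        simp only [Option.map_some, Option.getD_some, hgdt,
          PySem.Dict.getD_insert_self, zero_add]
        rw [hf]
        simp [hsmall, cdn_insert_insert, add_assoc]
      | none =>
        have hitems : tm.items = [] := (PySem.List.max?_eq_none_iff _ _).1 hm
        have hget0 : tm.getD 0 ((0 : Int), (0 : Int)) = (0, 0) := by
          cases tm with
          | mk items =>
            cases hitems
            rfl
        simp only [Option.map_none, Option.getD_none, hget0,
          PySem.Dict.getD_insert_self, zero_add]
        rw [hf]
        by_cases hd : (0 : Int) < dem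
        · simp [hd, cdn_insert_insert]
        · simp [hd, cdn_insert_insert]

-- proof-side: the evolving per-node state after B's pass
def cdnFinal (tm : PySem.Dict Int (Int × Int)) (dm : PySem.Dict Int Int)
    (by_cap : List (Int × Int × Int)) (caps : List Int)
    (cs : List (Int × Int × Int)) (st : PySem.Dict Int (Int × Int × Int)) :
    PySem.Dict Int (Int × Int × Int) :=
  cs.foldl (fun st c => st.insert c.2.1 (cdnAssign tm dm by_cap caps st c.2.1 c.2.2).2.2) st

-- A's whole fold = B's pass plus the zip reassembly
theorem cdn_fold_eq (tm : PySem.Dict Int (Int × Int)) (dm : PySem.Dict Int Int)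
    (hnd : tm.keys.Nodup) (cs : List (Int × Int × Int))
    (cost : Int) (paths : List (List Int × Int × Int × Int))
    (st : PySem.Dict Int (Int × Int × Int)) :
    cs.foldl (cdnStepA tm dm) (cost, paths, st)
      = (cost + (cdnRun tm dm (PySem.List.sorted tm.items (fun x => x.2.1) false)
            ((PySem.List.sorted tm.items (fun x => x.2.1) false).map (fun kv => kv.2.1)) cs st).1,
         paths ++ List.zipWith (fun c t => ([c.2.1], c.1, c.2.2, t)) cs
            (cdnRun tm dm (PySem.List.sorted tm.items (fun x => x.2.1) false)
              ((PySem.List.sorted tm.items (fun x => x.2.1) false).map (fun kv => kv.2.1)) cs st).2,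
         cdnFinal tm dm (PySem.List.sorted tm.items (fun x => x.2.1) false)
            ((PySem.List.sorted tm.items (fun x => x.2.1) false).map (fun kv => kv.2.1)) cs st) := by
  induction cs generalizing cost paths st with
  | nil => simp [cdnRun, cdnFinal]
  | cons c rest ih =>
    rw [List.foldl_cons, cdn_step_eq tm dm hnd cost paths st c, ih]
    simp only [cdnRun, cdnFinal, List.foldl_cons, List.zipWith_cons_cons]
    refine Prod.ext ?_ (Prod.ext ?_ rfl)
    · simp [add_assoc]
    · simp

-- ===== VERDICT (by name: the statement is the Claim_ definition above) =====
theorem solve_cdn_deployment_spec : Claim_equal_solve_cdn_deployment := by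
  intro num_nodes edges consumers server_types node_deploy_costs _ _
  unfold Spec_solve_cdn_deployment
  have hnd : (PySem.Dict.ofList (server_types.map (fun t => (t.1, (t.2.1, t.2.2))))
      : PySem.Dict Int (Int × Int)).keys.Nodup := PySem.Dict.nodup_keys_ofList _
  simp only [solve_cdn_deployment, solve_cdn_deployment_alt, cdn_fold_eq _ _ hnd]
  simp
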